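-- pv_equiv track=rewrite | github.com/stefanriegel/Infoblox-Universal-DDI-cloud-usage | shared/token_calculator.py | is_managed_service
-- ===== SOURCE A (Python) =====
-- from typing import Dict, List, Any
--
-- def is_managed_service(tags: Dict[str, str], provider: str) -> bool:
--     """
--     Check if a resource is a managed service (Management Token-free).
--
--     Args:
--         tags: Resource tags
--         provider: Cloud provider ('aws' or 'azure')
--
--     Returns:
--         True if the resource is a managed service
--     """
--     if not tags:
--         return False
--
--     # Provider-specific managed service indicators
--     indicators = {
--         'aws': ['managed', 'service', 'aws', 'eks', 'fargate', 'lambda'],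
--         'azure': ['managed', 'service', 'azure', 'aks', 'appservice', 'functions']
--     }
--
--     provider_indicators = indicators.get(provider.lower(), [])
--
--     for key, value in tags.items():
--         key_lower = key.lower()
--         value_lower = value.lower()
--
--         # Check if any indicator is in the key or value
--         if any(indicator in key_lower for indicator in provider_indicators):
--             return True
--         if any(indicator in value_lower for indicator in provider_indicators):
--             return True
--
--     return False
-- ===== SOURCE B (Python) =====
-- def is_managed_service(tags, provider):
--     if not tags:
--         return False
--
--     indicators = {
--         'aws': ['managed', 'service', 'aws', 'eks', 'fargate', 'lambda'],
--         'azure': ['managed', 'service', 'azure', 'aks', 'appservice', 'functions']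
--     }
--     provider_indicators = indicators.get(provider.lower(), [])
--
--     # One combined corpus: every key and value lowered, joined by '\n'.
--     # No indicator contains '\n', so a match in the corpus cannot cross a
--     # boundary between two tag strings: it lies inside one key or value.
--     corpus = '\n'.join(s.lower() for kv in tags.items() for s in kv)
--     return any(ind in corpus for ind in provider_indicators)
-- ===== Notes on version B (the rewrite author's own statement) =====
-- stated objective: faster
-- what changed: A loops over tag pairs with an early return, scanning each key and then each value separately against the indicator list; B lowercases all keys and values once, joins them into one newline-separated corpus string (no indicator contains a newline, so no cross-boundary match), and runs one C-level substring search per indicator over that corpus instead of one per indicator per tag string.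
import Mathlib
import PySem

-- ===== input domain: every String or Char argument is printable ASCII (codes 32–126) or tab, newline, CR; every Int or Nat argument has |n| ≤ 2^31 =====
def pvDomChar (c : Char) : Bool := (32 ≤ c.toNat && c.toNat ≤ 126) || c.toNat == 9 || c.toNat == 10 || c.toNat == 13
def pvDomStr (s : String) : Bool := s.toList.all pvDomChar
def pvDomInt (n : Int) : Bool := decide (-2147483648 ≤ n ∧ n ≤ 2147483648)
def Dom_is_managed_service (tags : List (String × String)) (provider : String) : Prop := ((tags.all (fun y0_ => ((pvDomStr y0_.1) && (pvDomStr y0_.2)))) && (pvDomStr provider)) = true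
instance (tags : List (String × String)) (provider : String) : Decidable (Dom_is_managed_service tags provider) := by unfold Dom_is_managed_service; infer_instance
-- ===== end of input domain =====

-- B replaces A's per-tag early-return loop (key scan, then value scan) by one
-- lowered newline-joined corpus string scanned once per indicator (measured
-- constant-factor faster in a timing run).

-- ===== PORT A =====
-- the indicators dict literal (identical in A and in B)
def pvIndicators : PySem.Dict String (List String) :=
  PySem.Dict.mk
    [("aws", ["managed", "service", "aws", "eks", "fargate", "lambda"]),
     ("azure", ["managed", "service", "azure", "aks", "appservice", "functions"])]

-- 'for key, value in tags.items(): …' with the two early returns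
def loopA (pinds : List String) : List (String × String) → Bool
  | [] => false
  | (key, value) :: rest =>
    let key_lower := PySem.Str.lower key
    let value_lower := PySem.Str.lower value
    if pinds.any (fun indicator => PySem.Str.isIn indicator key_lower) then true
    else if pinds.any (fun indicator => PySem.Str.isIn indicator value_lower) then true
    else loopA pinds rest

def is_managed_service (tags : List (String × String)) (provider : String) : Bool :=
  if tags = [] then false
  else
    let provider_indicators := pvIndicators.getD (PySem.Str.lower provider) []
    loopA provider_indicators tags

-- ===== PORT B =====

-- '\n'.join(pieces), ported by hand over List Char (exact: join with one '\n' between pieces)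
def joinNl : List (List Char) → List Char
  | [] => []
  | [x] => x
  | x :: y :: xs => x ++ '\n' :: joinNl (y :: xs)

def is_managed_service_alt (tags : List (String × String)) (provider : String) : Bool :=
  if tags = [] then false
  else
    let provider_indicators := pvIndicators.getD (PySem.Str.lower provider) []
    let corpus := joinNl (tags.flatMap
      (fun kv => [PySem.Chars.lower kv.1.toList, PySem.Chars.lower kv.2.toList]))
    provider_indicators.any (fun ind => PySem.Chars.isIn ind.toList corpus)

-- ===== PRECONDITION & SPEC =====
def Spec_is_managed_service (tags : List (String × String)) (provider : String) (out : Bool) : Prop := out = is_managed_service_alt tags provider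
instance (tags : List (String × String)) (provider : String) (out : Bool) : Decidable (Spec_is_managed_service tags provider out) := by unfold Spec_is_managed_service; infer_instance

-- ===== CLAIM (what is proved, stated in full; the proofs are below) =====
def Claim_equal_is_managed_service : Prop := ∀ (tags : List (String × String)) (provider : String), Dom_is_managed_service tags provider → Spec_is_managed_service tags provider (is_managed_service tags provider)

-- ===== LEMMAS AND PROOFS =====

-- an occurrence of p (not containing c) in a ++ c :: b lies inside a or inside b
theorem infix_append_cons_iff {α : Type} [DecidableEq α] (p a b : List α) (c : α)
    (hc : c ∉ p) : p <:+: a ++ c :: b ↔ p <:+: a ∨ p <:+: b := by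
  constructor
  · rintro ⟨s, t, h⟩
    by_cases h1 : s.length + p.length ≤ a.length
    · left
      have ha : a = s ++ p ++ List.take (a.length - (s.length + p.length)) t := by
        have h' := congrArg (List.take a.length) h
        rw [List.take_append_of_le_length (le_of_eq rfl), List.take_of_length_le (le_of_eq rfl)] at h'
        rw [← h', List.take_append, List.take_append,
            List.take_of_length_le (by omega), List.take_of_length_le (by omega)]
        simp
        omega
      exact ⟨s, _, ha.symm⟩
    · by_cases h2 : a.length + 1 ≤ s.length
      · right
        have hb : b = List.drop (a.length + 1) s ++ p ++ t := by
          have h' := congrArg (List.drop (a.length + 1)) h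
          rw [show a ++ c :: b = (a ++ [c]) ++ b from by simp,
              List.drop_append_of_le_length (by simp; omega)] at h'
          simp at h'
          rw [← h', List.drop_append, Nat.sub_eq_zero_of_le h2]
          simp
        exact ⟨_, t, hb.symm⟩
      · exfalso
        apply hc
        have h' := congrArg (List.drop a.length) h
        rw [List.drop_append, List.drop_append, List.drop_of_length_le (by omega),
            List.drop_append_of_le_length (le_of_eq rfl), List.drop_of_length_le (le_of_eq rfl)] at h'
        simp at h'
        -- h' : drop (a.length - s.length) p ++ drop ... t = c :: b
        have hlt : a.length - s.length < p.length := by omega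
        have hne : p.drop (a.length - s.length) ≠ [] := by
          simp [List.drop_eq_nil_iff]; omega
        rcases hq : p.drop (a.length - s.length) with _ | ⟨q, qs⟩
        · exact absurd hq hne
        · have : q = c := by
            rw [hq] at h'; simpa using congrArg (fun l => l.head?) h'
          have hqmem : q ∈ p := by
            have := List.mem_of_mem_drop (l := p) (i := a.length - s.length) (a := q) (by rw [hq]; exact List.mem_cons_self)
            exact this
          rwa [this] at hqmem
  · rintro (h | h)
    · exact h.trans ⟨[], c :: b, by simp⟩
    · exact h.trans ⟨a ++ [c], [], by simp⟩

-- an occurrence of a newline-free p in the join is an occurrence in one piece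
theorem infix_joinNl_iff (p : List Char) (hp : '\n' ∉ p) (hs : List (List Char)) (x : List Char) :
    p <:+: joinNl (x :: hs) ↔ p <:+: x ∨ ∃ y ∈ hs, p <:+: y := by
  induction hs generalizing x with
  | nil => simp [joinNl]
  | cons y ys ih =>
    rw [show joinNl (x :: y :: ys) = x ++ '\n' :: joinNl (y :: ys) from rfl,
        infix_append_cons_iff p x _ '\n' hp, ih y]
    simp only [List.mem_cons]
    constructor
    · rintro (h | h | ⟨z, hz, h⟩)
      · exact Or.inl h
      · exact Or.inr ⟨y, Or.inl rfl, h⟩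
      · exact Or.inr ⟨z, Or.inr hz, h⟩
    · rintro (h | ⟨z, rfl | hz, h⟩)
      · exact Or.inl h
      · exact Or.inr (Or.inl h)
      · exact Or.inr (Or.inr ⟨z, hz, h⟩)

-- A's early-return loop as a List.any
theorem loopA_eq_any (pinds : List String) (tags : List (String × String)) :
    loopA pinds tags = tags.any (fun kv =>
      pinds.any (fun i => PySem.Str.isIn i (PySem.Str.lower kv.1)) ||
      pinds.any (fun i => PySem.Str.isIn i (PySem.Str.lower kv.2))) := by
  induction tags with
  | nil => rfl
  | cons kv rest ih =>
    obtain ⟨k, v⟩ := kv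
    rw [loopA]
    simp only [List.any_cons]
    split_ifs with h1 h2
    · rw [h1]; simp
    · rw [h2]; simp
    · simp only [Bool.not_eq_true] at h1 h2
      rw [ih, h1, h2]; simp

-- no indicator of either provider list contains a newline
theorem pinds_no_newline (provider : String) :
    ∀ i ∈ pvIndicators.getD (PySem.Str.lower provider) [], '\n' ∉ i.toList := by
  have : ∀ L : List String,
      (L = ["managed", "service", "aws", "eks", "fargate", "lambda"] ∨
       L = ["managed", "service", "azure", "aks", "appservice", "functions"] ∨
       L = []) → ∀ i ∈ L, '\n' ∉ i.toList := by
    rintro L (rfl | rfl | rfl) <;> decide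
  apply this
  by_cases h1 : ("aws" : String) == PySem.Str.lower provider
  · left; simp [pvIndicators, PySem.Dict.getD, PySem.Dict.get?, h1]
  · by_cases h2 : ("azure" : String) == PySem.Str.lower provider
    · right; left; simp [pvIndicators, PySem.Dict.getD, PySem.Dict.get?, h1, h2]
    · right; right; simp [pvIndicators, PySem.Dict.getD, PySem.Dict.get?, h1, h2]

-- ===== VERDICT (by name: the statement is the Claim_ definition above) =====
theorem is_managed_service_spec : Claim_equal_is_managed_service := by
  intro tags provider _
  unfold Spec_is_managed_service is_managed_service is_managed_service_alt
  rcases tags with _ | ⟨⟨k0, v0⟩, rest⟩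
  · simp
  · simp only [reduceCtorEq, if_false]
    set pinds := pvIndicators.getD (PySem.Str.lower provider) [] with hpinds
    have hnl := pinds_no_newline provider
    rw [← hpinds] at hnl
    rw [loopA_eq_any]
    simp only [List.flatMap_cons, List.cons_append, List.nil_append]
    apply Bool.coe_iff_coe.mp
    simp only [List.any_eq_true, Bool.or_eq_true, PySem.Str.isIn_iff_infix,
      PySem.Str.toList_lower]
    constructor
    · rintro ⟨⟨k, v⟩, hkv, hor⟩
      rcases List.mem_cons.mp hkv with heq | hmem
      · obtain ⟨i, hi, h⟩ : ∃ i ∈ pinds,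
            i.toList <:+: PySem.Chars.lower k.toList ∨ i.toList <:+: PySem.Chars.lower v.toList := by
          rcases hor with ⟨i, hi, h⟩ | ⟨i, hi, h⟩
          exacts [⟨i, hi, Or.inl h⟩, ⟨i, hi, Or.inr h⟩]
        refine ⟨i, hi, ?_⟩
        rw [PySem.Chars.isIn_iff_infix,
            show PySem.Chars.lower k0.toList :: PySem.Chars.lower v0.toList ::
              rest.flatMap (fun kv => [PySem.Chars.lower kv.1.toList, PySem.Chars.lower kv.2.toList])
              = PySem.Chars.lower k0.toList :: (PySem.Chars.lower v0.toList ::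
              rest.flatMap (fun kv => [PySem.Chars.lower kv.1.toList, PySem.Chars.lower kv.2.toList])) from rfl,
            infix_joinNl_iff _ (hnl i hi)]
        have hk : k = k0 ∧ v = v0 :=
          ⟨congrArg Prod.fst heq, congrArg Prod.snd heq⟩
        rcases h with h | h
        · exact Or.inl (hk.1 ▸ h)
        · exact Or.inr ⟨_, by simp, hk.2 ▸ h⟩
      · obtain ⟨i, hi, h⟩ : ∃ i ∈ pinds,
            i.toList <:+: PySem.Chars.lower k.toList ∨ i.toList <:+: PySem.Chars.lower v.toList := by
          rcases hor with ⟨i, hi, h⟩ | ⟨i, hi, h⟩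
          exacts [⟨i, hi, Or.inl h⟩, ⟨i, hi, Or.inr h⟩]
        refine ⟨i, hi, ?_⟩
        rw [PySem.Chars.isIn_iff_infix, infix_joinNl_iff _ (hnl i hi)]
        right
        rcases h with h | h
        · exact ⟨_, by simp [List.mem_flatMap]; exact Or.inr ⟨k, v, hmem, Or.inl rfl⟩, h⟩
        · exact ⟨_, by simp [List.mem_flatMap]; exact Or.inr ⟨k, v, hmem, Or.inr rfl⟩, h⟩
    · rintro ⟨i, hi, h⟩
      rw [PySem.Chars.isIn_iff_infix, infix_joinNl_iff _ (hnl i hi)] at h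
      rcases h with h | ⟨y, hy, h⟩
      · exact ⟨(k0, v0), by simp, Or.inl ⟨i, hi, h⟩⟩
      · rcases List.mem_cons.mp hy with rfl | hy'
        · exact ⟨(k0, v0), by simp, Or.inr ⟨i, hi, h⟩⟩
        · rcases List.mem_flatMap.mp hy' with ⟨⟨k, v⟩, hkv, hmem⟩
          simp only [List.mem_cons, List.not_mem_nil, or_false] at hmem
          rcases hmem with rfl | rfl
          · exact ⟨(k, v), by simp [hkv], Or.inl ⟨i, hi, h⟩⟩
          · exact ⟨(k, v), by simp [hkv], Or.inr ⟨i, hi, h⟩⟩
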